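-- pv_equiv track=rewrite | github.com/Kikuzawa/DSTU_VKB | Methods_Programming/laboratories/2/12.py | count_economically_viable_ways
-- ===== SOURCE A (Python) =====
-- def count_economically_viable_ways(k: int, operations: str) -> int:
--     n: int = len(operations)
--     viable_ways: int = 0
--     consecutive_matches: int = 0
--
--     # Проходим по строке операций с конца к началу
--     for i in range(n - k - 1, -1, -1):
--         if operations[i] == operations[i + k]:
--             consecutive_matches += 1
--         else:
--             consecutive_matches = 0
--
--         viable_ways += consecutive_matches
--
--     return viable_ways
-- ===== SOURCE B (Python) =====
-- def count_economically_viable_ways(k: int, operations: str) -> int: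
--     # Divide and conquer: the answer is the number of intervals [i, j] on which
--     # every comparison operations[m] == operations[m + k] holds.  Each segment
--     # returns (interval count, longest all-match prefix, longest all-match
--     # suffix); merging two halves adds suffix(left) * prefix(right) for the
--     # intervals spanning the split.
--     bs = [operations[i] == operations[i + k] for i in range(len(operations) - k)]
--
--     def solve(seg):
--         if not seg:
--             return (0, 0, 0)
--         if len(seg) == 1:
--             v = 1 if seg[0] else 0
--             return (v, v, v)
--         mid = len(seg) // 2
--         cl, pl, sl = solve(seg[:mid])
--         cr, pr, sr = solve(seg[mid:])
--         c = cl + cr + sl * pr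
--         p = pl + pr if pl == mid else pl
--         s = sr + sl if sr == len(seg) - mid else sr
--         return (c, p, s)
--
--     return solve(bs)[0]
-- ===== Notes on version B (the rewrite author's own statement) =====
-- stated objective: alternative
-- what changed: A makes one backward linear scan with a running consecutive-match counter added at every step; B builds the list of per-position match booleans and counts all-match intervals by divide and conquer, each recursive call returning (count, longest matching prefix, longest matching suffix) and the merge adding suffix(left)*prefix(right) for intervals spanning the split.
import Mathlib
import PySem

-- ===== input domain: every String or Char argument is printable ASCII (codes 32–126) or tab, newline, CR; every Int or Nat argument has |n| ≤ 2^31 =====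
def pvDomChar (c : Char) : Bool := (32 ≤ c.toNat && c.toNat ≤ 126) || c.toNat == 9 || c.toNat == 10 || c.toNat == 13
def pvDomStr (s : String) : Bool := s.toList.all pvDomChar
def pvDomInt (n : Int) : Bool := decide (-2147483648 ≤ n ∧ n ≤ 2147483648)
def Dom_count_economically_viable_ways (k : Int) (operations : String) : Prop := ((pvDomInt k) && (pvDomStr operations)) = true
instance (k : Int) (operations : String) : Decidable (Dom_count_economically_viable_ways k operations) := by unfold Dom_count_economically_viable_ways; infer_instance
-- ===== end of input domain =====

-- B replaces A's backward linear scan (running counter re-added each step) by a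
-- divide-and-conquer count of all-match intervals, each call returning
-- (count, matching prefix length, matching suffix length) (objective: alternative; same cost).


-- ===== PORT A =====
-- literal transliteration of A: backward loop over range(n-k-1, -1, -1),
-- state (viable_ways, consecutive_matches); operations[i] via Str.pyGet? (in range under Pre_).
def count_economically_viable_ways (k : Int) (operations : String) : Int :=
  let n : Int := PySem.Str.len operations
  let st := (PySem.List.pyRange (n - k - 1) (-1) (-1)).foldl
    (fun (st : Int × Int) i =>
      if PySem.Str.pyGet? operations i == PySem.Str.pyGet? operations (i + k)
      then (st.1 + (st.2 + 1), st.2 + 1)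
      else (st.1, 0)) (0, 0)
  st.1

-- ===== PORT B =====
-- transliteration of B's inner `solve`: divide and conquer on the boolean
-- match list; returns (interval count, matching prefix length, matching suffix length).
def pvSolve : List Bool → Int × Int × Int
  | [] => (0, 0, 0)
  | [b] => ((if b then 1 else 0), (if b then 1 else 0), (if b then 1 else 0))
  | a :: b :: t =>
    let mid : Nat := (a :: b :: t).length / 2
    let L := pvSolve ((a :: b :: t).take mid)
    let R := pvSolve ((a :: b :: t).drop mid)
    (L.1 + R.1 + L.2.2 * R.2.1,
     if L.2.1 == (mid : Int) then L.2.1 + R.2.1 else L.2.1,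
     if R.2.2 == (((a :: b :: t).length - mid : Nat) : Int) then R.2.2 + L.2.2 else R.2.2)
termination_by seg => seg.length
decreasing_by
  · simp [List.length_take]; omega
  · simp [List.length_drop]; omega

-- transliteration of B: build the comparison list, then solve it.
def count_economically_viable_ways_alt (k : Int) (operations : String) : Int :=
  let bs := (PySem.List.pyRange 0 (PySem.Str.len operations - k) 1).map
    (fun i => PySem.Str.pyGet? operations i == PySem.Str.pyGet? operations (i + k))
  (pvSolve bs).1

-- ===== PRECONDITION & SPEC =====
-- Pre_ excludes exactly k < 0, where Python A raises IndexError (operations[i] with i ≥ len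
-- is always reached when k < 0); B raises there too.
def Pre_count_economically_viable_ways (k : Int) (operations : String) : Prop := 0 ≤ k
instance (k : Int) (operations : String) : Decidable (Pre_count_economically_viable_ways k operations) := by unfold Pre_count_economically_viable_ways; infer_instance
def pvWitness_count_economically_viable_ways : Int × String := (1, "aabbaa")

def Spec_count_economically_viable_ways (k : Int) (operations : String) (out : Int) : Prop := out = count_economically_viable_ways_alt k operations
instance (k : Int) (operations : String) (out : Int) : Decidable (Spec_count_economically_viable_ways k operations out) := by unfold Spec_count_economically_viable_ways; infer_instance

-- ===== CLAIM (what is proved, stated in full; the proofs are below) =====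
def Claim_equal_count_economically_viable_ways : Prop := ∀ (k : Int) (operations : String), Dom_count_economically_viable_ways k operations → Pre_count_economically_viable_ways k operations → Spec_count_economically_viable_ways k operations (count_economically_viable_ways k operations)

-- ===== LEMMAS AND PROOFS =====

-- length of the leading run of `true`s
def pvLead : List Bool → Int
  | [] => 0
  | true :: t => pvLead t + 1
  | false :: _ => 0

-- length of the trailing run of `true`s
def pvTrail (bs : List Bool) : Int := pvLead bs.reverse

-- number of intervals [i,j] within bs on which every entry is true
def pvN : List Bool → Int
  | [] => 0
  | b :: t => (if b then pvLead t + 1 else 0) + pvN t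

-- A's loop body on the comparison outcome
def pvStepA : Int × Int → Bool → Int × Int :=
  fun st b => if b then (st.1 + (st.2 + 1), st.2 + 1) else (st.1, 0)

lemma pvLead_le (bs : List Bool) : pvLead bs ≤ bs.length := by
  induction bs with
  | nil => simp [pvLead]
  | cons b t ih => cases b <;> simp [pvLead] <;> omega

lemma pvLead_eq_length_iff (bs : List Bool) :
    pvLead bs = (bs.length : Int) ↔ ∀ x ∈ bs, x = true := by
  induction bs with
  | nil => simp [pvLead]
  | cons b t ih =>
    cases b
    · have h1 := pvLead_le t
      simp only [pvLead, List.length_cons, List.mem_cons]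
      constructor
      · intro hc; exfalso; push_cast at hc; omega
      · intro hall; exact absurd (hall false (Or.inl rfl)) (by simp)
    · simp only [pvLead, List.length_cons, List.mem_cons]
      constructor
      · intro hc x hx
        rcases hx with rfl | hx
        · rfl
        · exact ih.mp (by push_cast at hc ⊢; omega) x hx
      · intro hall
        have := ih.mpr (fun x hx => hall x (Or.inr hx))
        push_cast at this ⊢; omega

lemma pvTrail_eq_length_iff (bs : List Bool) :
    pvTrail bs = (bs.length : Int) ↔ pvLead bs = (bs.length : Int) := by
  have h1 := pvLead_eq_length_iff bs.reverse
  have h2 := pvLead_eq_length_iff bs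
  simp only [List.length_reverse] at h1
  unfold pvTrail
  rw [h1, h2]
  simp

lemma pvLead_append (l r : List Bool) :
    pvLead (l ++ r) =
      if pvLead l = (l.length : Int) then (l.length : Int) + pvLead r else pvLead l := by
  induction l with
  | nil => simp [pvLead]
  | cons b t ih =>
    cases b
    · have h1 := pvLead_le t
      simp only [List.cons_append, pvLead, List.length_cons]
      rw [if_neg (by push_cast; omega)]
    · simp only [List.cons_append, pvLead, ih, List.length_cons]
      by_cases h : pvLead t = (t.length : Int)
      · rw [if_pos h, if_pos (by push_cast; omega)]
        push_cast; omega
      · rw [if_neg h, if_neg (by push_cast; omega)]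

lemma pvTrail_append (l r : List Bool) :
    pvTrail (l ++ r) =
      if pvTrail r = (r.length : Int) then (r.length : Int) + pvTrail l else pvTrail r := by
  unfold pvTrail
  rw [List.reverse_append, pvLead_append]
  simp

lemma pvTrail_singleton_true : pvTrail [true] = 1 := by decide

lemma pvTrail_singleton_false : pvTrail [false] = 0 := by decide

lemma pvN_append (l r : List Bool) :
    pvN (l ++ r) = pvN l + pvN r + pvTrail l * pvLead r := by
  induction l with
  | nil => simp [pvN, pvTrail, pvLead]
  | cons b t ih =>
    have htr := pvTrail_append [b] t
    simp only [List.singleton_append, List.length_cons, List.length_nil] at htr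
    simp only [List.cons_append, pvN, ih, pvLead_append]
    cases b
    · have h1 : pvTrail (false :: t) = pvTrail t := by
        rw [htr, pvTrail_singleton_false]
        split_ifs with hc
        · omega
        · rfl
      simp only [h1, if_neg (Bool.false_ne_true)]; ring
    · by_cases h : pvLead t = (t.length : Int)
      · have h2 : pvTrail (true :: t) = (t.length : Int) + 1 := by
          rw [htr, pvTrail_singleton_true, if_pos ((pvTrail_eq_length_iff t).mpr h)]
        have htt := (pvTrail_eq_length_iff t).mpr h
        simp only [if_pos h, if_true, h2, h, htt]; ring
      · have h2 : pvTrail (true :: t) = pvTrail t := by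
          rw [htr, pvTrail_singleton_true, if_neg]
          intro hc; exact h ((pvTrail_eq_length_iff t).mp hc)
        simp only [if_neg h, if_true, h2]; ring

lemma pvSolve_spec (seg : List Bool) :
    pvSolve seg = (pvN seg, pvLead seg, pvTrail seg) := by
  induction hn : seg.length using Nat.strong_induction_on generalizing seg with
  | _ n ih =>
  match seg with
  | [] => simp [pvSolve, pvN, pvLead, pvTrail]
  | [b] => cases b <;> simp [pvSolve, pvN, pvLead, pvTrail]
  | a :: b :: t =>
    subst hn
    have hmle : (a :: b :: t).length / 2 ≤ (a :: b :: t).length := Nat.div_le_self _ _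
    have hpos : 1 ≤ (a :: b :: t).length / 2 := by simp; omega
    have hlt2 : (a :: b :: t).length / 2 < (a :: b :: t).length := by simp; omega
    have hT := ih (List.take ((a :: b :: t).length / 2) (a :: b :: t)).length
      (by simp [List.length_take]; omega) _ rfl
    have hD := ih (List.drop ((a :: b :: t).length / 2) (a :: b :: t)).length
      (by simp [List.length_drop]; omega) _ rfl
    have hsplit : ∀ g : List Bool → Int,
        g (a :: b :: t) = g (List.take ((a :: b :: t).length / 2) (a :: b :: t)
          ++ List.drop ((a :: b :: t).length / 2) (a :: b :: t)) := by
      intro g; rw [List.take_append_drop]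
    rw [pvSolve, hT, hD, hsplit pvN, hsplit pvLead, hsplit pvTrail,
        pvN_append, pvLead_append, pvTrail_append]
    have hlt : (List.take ((a :: b :: t).length / 2) (a :: b :: t)).length
        = (a :: b :: t).length / 2 := by simp [List.length_take]; omega
    have hld : (List.drop ((a :: b :: t).length / 2) (a :: b :: t)).length
        = (a :: b :: t).length - (a :: b :: t).length / 2 := by simp [List.length_drop]
    rw [hlt, hld]
    simp only [Prod.mk.injEq, beq_iff_eq]
    refine ⟨by trivial, ?_, ?_⟩
    · split_ifs with h
      · rw [h]
      · rfl
    · split_ifs with h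
      · rw [h]
      · rfl

lemma pvA_rev (bs : List Bool) :
    bs.reverse.foldl pvStepA (0, 0) = (pvN bs, pvLead bs) := by
  induction bs with
  | nil => rfl
  | cons b t ih =>
    rw [List.reverse_cons, List.foldl_append, ih, List.foldl_cons, List.foldl_nil]
    cases b
    · simp [pvStepA, pvN, pvLead]
    · simp only [pvStepA, pvN, pvLead, if_true, Prod.mk.injEq]
      exact ⟨by ring, trivial⟩

-- ===== VERDICT (by name: the statement is the Claim_ definition above) =====
theorem count_economically_viable_ways_spec : Claim_equal_count_economically_viable_ways := by
  intro k operations _ _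
  show count_economically_viable_ways k operations = count_economically_viable_ways_alt k operations
  simp only [count_economically_viable_ways, count_economically_viable_ways_alt]
  have hrange : PySem.List.pyRange (PySem.Str.len operations - k - 1) (-1) (-1)
      = (PySem.List.pyRange 0 (PySem.Str.len operations - k) 1).reverse := by
    have := PySem.List.pyRange_neg_one_eq_reverse (PySem.Str.len operations - k - 1) (-1)
    simpa using this
  rw [hrange]
  show (((PySem.List.pyRange 0 (PySem.Str.len operations - k) 1).reverse).foldl
      (fun st i => pvStepA st
        (PySem.Str.pyGet? operations i == PySem.Str.pyGet? operations (i + k))) (0, 0)).1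
    = (pvSolve ((PySem.List.pyRange 0 (PySem.Str.len operations - k) 1).map
        (fun i => PySem.Str.pyGet? operations i == PySem.Str.pyGet? operations (i + k)))).1
  rw [← List.foldl_map
        (f := fun i => PySem.Str.pyGet? operations i == PySem.Str.pyGet? operations (i + k))
        (g := pvStepA),
      List.map_reverse, pvA_rev, pvSolve_spec]
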